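-- pv_equiv track=rewrite | github.com/VictorMessias/scraping-lodgify | subdomain_fetch.py | _generate_additional_subdomains
-- ===== SOURCE A (Python) =====
-- from typing import List
--
-- def _generate_additional_subdomains(count: int) -> List[str]:
--     """Generate additional subdomains based on common patterns"""
--     prefixes = ['ocean', 'mountain', 'city', 'beach', 'lake', 'forest', 'valley', 'hill', 'river', 'sunset']
--     suffixes = ['resort', 'hotel', 'lodge', 'inn', 'suites', 'rentals', 'properties', 'vacation']
--     additional = []
--
--     for i in range(count):
--         if i < len(prefixes) * len(suffixes):
--             prefix = prefixes[i % len(prefixes)]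
--             suffix = suffixes[i // len(prefixes)]
--             subdomain = f"{prefix}{suffix}.lodgify.com"
--         else:
--             subdomain = f"property{i:03d}.lodgify.com"
--         additional.append(subdomain)
--
--     return additional
-- ===== SOURCE B (Python) =====
-- from typing import List
--
-- def _generate_additional_subdomains(count: int) -> List[str]:
--     """Generate additional subdomains based on common patterns"""
--     prefixes = ['ocean', 'mountain', 'city', 'beach', 'lake', 'forest', 'valley', 'hill', 'river', 'sunset']
--     suffixes = ['resort', 'hotel', 'lodge', 'inn', 'suites', 'rentals', 'properties', 'vacation']
--     combos = [f"{prefix}{suffix}.lodgify.com" for suffix in suffixes for prefix in prefixes]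
--     n = max(0, min(count, len(combos)))
--     result = combos[:n]
--     result += [f"property{i:03d}.lodgify.com" for i in range(len(combos), count)]
--     return result
-- ===== Notes on version B (the rewrite author's own statement) =====
-- stated objective: alternative
-- what changed: Replaces A's single index-driven loop (per-element modulus/floordiv table lookups with an in-loop branch) by precomputing the full suffix-outer/prefix-inner product table once, slicing it to the clamped count, and appending the overflow property names in a separate range pass.
import Mathlib
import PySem

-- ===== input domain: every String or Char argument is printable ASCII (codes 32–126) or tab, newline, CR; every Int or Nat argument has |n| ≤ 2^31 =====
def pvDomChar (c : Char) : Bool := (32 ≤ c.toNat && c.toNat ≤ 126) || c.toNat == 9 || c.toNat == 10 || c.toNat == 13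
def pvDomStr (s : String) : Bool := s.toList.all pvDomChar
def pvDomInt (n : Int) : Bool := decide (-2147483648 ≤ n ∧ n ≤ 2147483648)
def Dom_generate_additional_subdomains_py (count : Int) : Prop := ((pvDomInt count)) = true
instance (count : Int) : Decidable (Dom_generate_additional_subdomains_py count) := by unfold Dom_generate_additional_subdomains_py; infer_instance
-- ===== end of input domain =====

-- ===== PORT A =====
-- B replaces A's single index-driven loop (i%10 / i//10 lookups per element) by a
-- precomputed suffix-outer/prefix-inner product table sliced to the count, plus a
-- separate pass for the overflow "propertyNNN" names (objective: alternative).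

def pvPrefixes : List String :=
  ["ocean", "mountain", "city", "beach", "lake", "forest", "valley", "hill", "river", "sunset"]
def pvSuffixes : List String :=
  ["resort", "hotel", "lodge", "inn", "suites", "rentals", "properties", "vacation"]

-- f-string concatenation done on the character lists (String.append is kernel-opaque)
def pvCat2 (a b : String) : String := String.ofList (a.toList ++ b.toList ++ ".lodgify.com".toList)

-- f"property{i:03d}.lodgify.com"; the zero-padding is exact for i ≥ 0 (the only calls both
-- programs make have i ≥ 80)
def pvProp (i : Int) : String :=
  let cs := PySem.Int.toChars i
  String.ofList ("property".toList ++ (List.replicate (3 - cs.length) '0' ++ cs) ++ ".lodgify.com".toList)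

-- literal transliteration of A: one loop over range(count) with the branch on the index
def generate_additional_subdomains_py (count : Int) : List String :=
  (PySem.List.pyRange 0 count 1).foldl (fun additional i =>
    additional ++
      [ if i < (pvPrefixes.length : Int) * (pvSuffixes.length : Int) then
          pvCat2 ((PySem.List.pyGet? pvPrefixes (PySem.Int.mod i (pvPrefixes.length : Int))).getD "")
                 ((PySem.List.pyGet? pvSuffixes (PySem.Int.floordiv i (pvPrefixes.length : Int))).getD "")
        else
          pvProp i ]) []

-- ===== PORT B =====
-- combos = [f"{prefix}{suffix}.lodgify.com" for suffix in suffixes for prefix in prefixes]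
def pvCombos : List String := pvSuffixes.flatMap (fun s => pvPrefixes.map (fun p => pvCat2 p s))

def generate_additional_subdomains_py_alt (count : Int) : List String :=
  -- n = max(0, min(count, len(combos)));  result = combos[:n] + [property names]
  PySem.List.slice pvCombos none (some (max 0 (min count (pvCombos.length : Int)))) ++
    (PySem.List.pyRange (pvCombos.length : Int) count 1).map (fun i => pvProp i)

-- ===== PRECONDITION & SPEC =====
def Spec_generate_additional_subdomains_py (count : Int) (out : List String) : Prop := out = generate_additional_subdomains_py_alt count
instance (count : Int) (out : List String) : Decidable (Spec_generate_additional_subdomains_py count out) := by unfold Spec_generate_additional_subdomains_py; infer_instance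

-- ===== CLAIM (what is proved, stated in full; the proofs are below) =====
def Claim_equal_generate_additional_subdomains_py : Prop := ∀ (count : Int), Dom_generate_additional_subdomains_py count → Spec_generate_additional_subdomains_py count (generate_additional_subdomains_py count)

-- ===== LEMMAS AND PROOFS =====

-- the per-index element A's loop body appends
def pvF (i : Int) : String :=
  if i < (pvPrefixes.length : Int) * (pvSuffixes.length : Int) then
    pvCat2 ((PySem.List.pyGet? pvPrefixes (PySem.Int.mod i (pvPrefixes.length : Int))).getD "")
           ((PySem.List.pyGet? pvSuffixes (PySem.Int.floordiv i (pvPrefixes.length : Int))).getD "")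
  else
    pvProp i

theorem pvA_eq_map (count : Int) :
    generate_additional_subdomains_py count = (PySem.List.pyRange 0 count 1).map pvF := by
  have h := PySem.List.foldl_append_singleton_eq_map pvF (PySem.List.pyRange 0 count 1) []
  simpa [generate_additional_subdomains_py, pvF] using h

theorem pvRangeNat (m : Nat) :
    PySem.List.pyRange 0 (m : Int) 1 = (List.range m).map Int.ofNat := by
  rw [PySem.List.pyRange_one]
  simp only [zero_add, sub_zero, Int.toNat_natCast]
  rfl

theorem pvF_table : ((List.range 80).map Int.ofNat).map pvF = pvCombos := by decide

theorem pvTake (n : Nat) (hn : n ≤ 80) :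
    (PySem.List.pyRange 0 (n : Int) 1).map pvF = pvCombos.take n := by
  rw [pvRangeNat, ← pvF_table, List.map_map, List.map_map, ← List.map_take, List.take_range]
  have : min n 80 = n := by omega
  rw [this]

theorem pvF_prop (i : Int) (h : 80 ≤ i) : pvF i = pvProp i := by
  unfold pvF
  rw [if_neg]
  simp only [pvPrefixes, pvSuffixes]
  intro hc
  simp only [List.length] at hc
  omega

-- ===== VERDICT (by name: the statement is the Claim_ definition above) =====
theorem generate_additional_subdomains_py_spec : Claim_equal_generate_additional_subdomains_py := by
  intro count _
  unfold Spec_generate_additional_subdomains_py generate_additional_subdomains_py_alt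
  rw [pvA_eq_map]
  have hlen : (pvCombos.length : Int) = 80 := by decide
  rw [PySem.List.slice_to, hlen]
  by_cases hc : count ≤ 80
  · rw [PySem.List.pyRange_one_eq_nil hc, List.map_nil, List.append_nil]
    by_cases h0 : count ≤ 0
    · rw [PySem.List.pyRange_one_eq_nil h0, List.map_nil]
      have h : (max 0 (min count (80 : Int))).toNat = 0 := by omega
      rw [h, List.take_zero]
    · have hcn : count = ((count.toNat : Nat) : Int) := by omega
      have h : (max 0 (min count (80 : Int))).toNat = count.toNat := by omega
      rw [h, hcn, pvTake count.toNat (by omega), Int.toNat_natCast]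
  · push Not at hc
    rw [PySem.List.pyRange_one_append 0 80 count (by omega) (by omega), List.map_append]
    have hmax : (max 0 (min count (80 : Int))).toNat = 80 := by omega
    rw [hmax]
    congr 1
    · exact List.map_congr_left (fun i hi => pvF_prop i (PySem.List.mem_pyRange_one.mp hi).1)
  · exact le_max_left _ _
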